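-- pv_equiv track=rewrite | github.com/KiGi01/Intern_2022 | 장윤하/Q2. longest_string.py | set_string
-- ===== SOURCE A (Python) =====
-- def set_string(input_string):
--     st = input_string
--     output_string = ['']              # 공집합 추가
--     length = len(st) + 1                          # 리스트 길이에 1을 더한 수를 저장 (리스트 길이만큼 반복하기 위해)
--     # #(예: input_string [0:1] [1:2] [2:3] [3:4]/ [0:2] [1:3] [2:4]/ [0:3] [1:4]/ [0:4]) 추가 ##
--     for i in range(1, length):                              # i는 1 ~ 4
--         for j in range(0, length - i):                      # j는 위 문자열의 범위에서 시작 범위를 의미  --- 부분문자열 각 자리수마다 0부터 5 - i - 1까지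
--             output_string.append(st[j:(j + i)])             # input_string의 j번째 부터 j + i - 1번쨰 자리까지의 문자열을 리스트에 추가
--     return output_string
-- ===== SOURCE B (Python) =====
-- def set_string(input_string):
--     st = input_string
--     subs = [st[j:k] for j in range(len(st)) for k in range(j + 1, len(st) + 1)]
--     subs.sort(key=len)
--     return [''] + subs
-- ===== Notes on version B (the rewrite author's own statement) =====
-- stated objective: alternative
-- what changed: A enumerates substrings grouped by length with two nested index loops; B generates all substrings in start-major order with a single comprehension and recovers the length-then-start order by one stable sort on length, prepending the empty string.
import Mathlib
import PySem

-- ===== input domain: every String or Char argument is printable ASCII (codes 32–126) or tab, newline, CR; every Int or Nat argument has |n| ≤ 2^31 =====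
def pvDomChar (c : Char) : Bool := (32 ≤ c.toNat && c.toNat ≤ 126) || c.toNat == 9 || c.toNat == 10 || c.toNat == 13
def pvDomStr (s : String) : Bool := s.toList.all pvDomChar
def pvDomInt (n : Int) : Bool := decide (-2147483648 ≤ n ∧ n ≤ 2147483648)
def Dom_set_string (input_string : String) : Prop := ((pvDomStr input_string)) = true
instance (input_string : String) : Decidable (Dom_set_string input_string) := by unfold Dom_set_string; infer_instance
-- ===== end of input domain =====

-- B replaces A's length-grouped double loop by start-major generation of all substrings plus one
-- stable sort on length ('alternative' objective; not claimed faster).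

-- ===== PORT A =====
def set_string (input_string : String) : List String :=
  let st := input_string
  let length : Int := PySem.Str.len st + 1
  (PySem.List.pyRange 1 length 1).foldl (fun output_string i =>
    (PySem.List.pyRange 0 (length - i) 1).foldl (fun output_string j =>
      output_string ++ [PySem.Str.slice st (some j) (some (j + i))]) output_string) [""]

-- ===== PORT B =====
def set_string_alt (input_string : String) : List String :=
  let st := input_string
  let subs := (PySem.List.pyRange 0 (PySem.Str.len st) 1).flatMap (fun j =>
    (PySem.List.pyRange (j + 1) (PySem.Str.len st + 1) 1).map (fun k =>
      PySem.Str.slice st (some j) (some k)))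
  [""] ++ PySem.List.sorted subs (fun s => PySem.Str.len s) false

-- ===== PRECONDITION & SPEC =====
def Spec_set_string (input_string : String) (out : List String) : Prop := out = set_string_alt input_string
instance (input_string : String) (out : List String) : Decidable (Spec_set_string input_string out) := by unfold Spec_set_string; infer_instance

-- ===== CLAIM (what is proved, stated in full; the proofs are below) =====
def Claim_equal_set_string : Prop := ∀ (input_string : String), Dom_set_string input_string → Spec_set_string input_string (set_string input_string)

-- ===== LEMMAS AND PROOFS =====

-- the substring st[j:j+L], as both ports produce it
def sl (s : String) (j L : Nat) : String :=
  PySem.Str.slice s (some (j : Int)) (some ((j : Int) + (L : Int)))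

lemma len_sl (s : String) (j L : Nat) (h : j + L ≤ s.toList.length) :
    PySem.Str.len (sl s j L) = (L : Int) := by
  rw [PySem.Str.len_eq]
  have hls : (sl s j L).toList = (s.toList.drop j).take L := by
    rw [sl, PySem.Str.toList_slice, PySem.Chars.slice_eq_listSlice, PySem.List.slice_natCast_add]
  rw [hls]
  simp only [List.length_take, List.length_drop]
  congr 1
  omega

lemma range_filter_eq (r i : Nat) :
    (List.range r).filter (fun d => decide (d = i)) = if i < r then [i] else [] := by
  induction r with
  | zero => simp
  | succ r ih =>
    rw [List.range_succ, List.filter_append, ih]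
    rcases Nat.lt_trichotomy i r with h | h | h
    · have hne : ¬ (r = i) := by omega
      simp [h, Nat.lt_succ_of_lt h, hne]
    · subst h
      simp
    · have hne : ¬ (r = i) := by omega
      have h1 : ¬ i < r := by omega
      have h2 : ¬ i < r + 1 := by omega
      simp [h1, h2, hne]

lemma flatMap_range_if {β : Type} (n m : Nat) (f : Nat → β) (hm : m ≤ n) :
    (List.range n).flatMap (fun j => if j < m then [f j] else []) = (List.range m).map f := by
  obtain ⟨k, rfl⟩ := Nat.exists_eq_add_of_le hm
  rw [List.range_add, List.flatMap_append]
  have h1 : (List.range m).flatMap (fun j => if j < m then [f j] else []) = (List.range m).map f := by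
    rw [← List.flatMap_singleton' ((List.range m).map f), List.flatMap_map]
    exact List.flatMap_congr (fun j hj => by simp [List.mem_range.mp hj])
  have h2 : ((List.range k).map (fun x => m + x)).flatMap (fun j => if j < m then [f j] else []) = [] := by
    rw [List.flatMap_map]
    simp
  rw [h1, h2, List.append_nil]

-- insertBy places x after every element it is not 'before' and before all the rest.
lemma insertBy_split {α : Type} (bf : α → α → Bool) (x : α) (P Q : List α)
    (hP : ∀ y ∈ P, bf x y = false) (hQ : ∀ y ∈ Q, bf x y = true) :
    PySem.List.insertBy bf x (P ++ Q) = P ++ x :: Q := by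
  induction P with
  | nil =>
    cases Q with
    | nil => rfl
    | cons q t => simp [PySem.List.insertBy, hQ q (by simp)]
  | cons p P ih =>
    simp only [List.cons_append, PySem.List.insertBy, hP p (by simp)]
    simp only [Bool.false_eq_true, if_false, List.cons.injEq, true_and]
    exact ih (fun y hy => hP y (by simp [hy]))

lemma key_of_mem_filter {α : Type} (key : α → Int) (k : Int) {y : α} {xs : List α}
    (h : y ∈ xs.filter (fun x => decide (key x = k))) : key y = k :=
  of_decide_eq_true (List.mem_filter.mp h).2

-- STABILITY: a stable sort of a list whose keys all lie in a strictly increasing key list ks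
-- is the concatenation, over k ∈ ks in order, of the elements of key k in their original order.
lemma sorted_blocks {α : Type} (key : α → Int) (ks : List Int) (hks : ks.Pairwise (· < ·))
    (xs : List α) (hmem : ∀ x ∈ xs, key x ∈ ks) :
    PySem.List.sorted xs key false =
      ks.flatMap (fun k => xs.filter (fun x => decide (key x = k))) := by
  induction xs using List.reverseRecOn with
  | nil => simp [PySem.List.sorted_eq_foldl_insertBy]
  | append_singleton xs x ih =>
    rw [PySem.List.sorted_eq_foldl_insertBy, List.foldl_append, ← PySem.List.sorted_eq_foldl_insertBy]
    simp only [List.foldl_cons, List.foldl_nil]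
    rw [ih (fun y hy => hmem y (by simp [hy]))]
    obtain ⟨l1, l2, hdec⟩ := List.mem_iff_append.mp (hmem x (by simp))
    subst hdec
    have hpa := (List.pairwise_append.mp hks)
    have h1 : ∀ a ∈ l1, a < key x := fun a ha => hpa.2.2 a ha (key x) (by simp)
    have h2 : ∀ b ∈ l2, key x < b := (List.pairwise_cons.mp hpa.2.1).1
    have hsplit :
        (l1 ++ key x :: l2).flatMap (fun k => xs.filter (fun x => decide (key x = k)))
          = (l1.flatMap (fun k => xs.filter (fun x => decide (key x = k)))
              ++ xs.filter (fun y => decide (key y = key x)))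
            ++ l2.flatMap (fun k => xs.filter (fun x => decide (key x = k))) := by
      simp [List.flatMap_append]
    rw [hsplit, insertBy_split]
    · simp only [List.flatMap_append, List.flatMap_cons, List.filter_append]
      have e1 : l1.flatMap (fun k => xs.filter (fun x => decide (key x = k)) ++ List.filter (fun x => decide (key x = k)) [x])
          = l1.flatMap (fun k => xs.filter (fun x => decide (key x = k))) := by
        refine List.flatMap_congr (fun k hk => ?_)
        have he : (List.filter (fun x => decide (key x = k)) [x]) = [] := by
          have := h1 k hk; simp; omega
        simp [he]
      have e2 : l2.flatMap (fun k => xs.filter (fun x => decide (key x = k)) ++ List.filter (fun x => decide (key x = k)) [x])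
          = l2.flatMap (fun k => xs.filter (fun x => decide (key x = k))) := by
        refine List.flatMap_congr (fun k hk => ?_)
        have he : (List.filter (fun x => decide (key x = k)) [x]) = [] := by
          have := h2 k hk; simp; omega
        simp [he]
      have e3 : List.filter (fun y => decide (key y = key x)) [x] = [x] := by simp
      rw [e1, e2, e3]
      simp
    · intro y hy
      simp only [List.mem_append] at hy
      rcases hy with hy | hy
      · obtain ⟨k, hk, hyk⟩ := List.mem_flatMap.mp hy
        have := key_of_mem_filter key k hyk
        have := h1 k hk
        simp; omega
      · have := key_of_mem_filter key (key x) hy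
        simp; omega
    · intro y hy
      obtain ⟨k, hk, hyk⟩ := List.mem_flatMap.mp hy
      have := key_of_mem_filter key k hyk
      have := h2 k hk
      simp; omega

theorem set_string_eq_alt (s : String) : set_string s = set_string_alt s := by
  have hn : PySem.Str.len s = (s.toList.length : Int) := PySem.Str.len_eq s
  set n := s.toList.length with hndef
  -- ===== A side =====
  have hA : set_string s
      = [""] ++ (List.range n).flatMap (fun i => (List.range (n - i)).map (fun j => sl s j (i + 1))) := by
    simp only [set_string, hn]
    rw [PySem.List.pyRange_one]
    have h1 : ((n : Int) + 1 - 1).toNat = n := by omega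
    rw [h1, List.foldl_map]
    simp only [PySem.List.foldl_append_singleton_eq_map]
    rw [PySem.List.foldl_append_eq_flatMap]
    congr 1
    refine List.flatMap_congr (fun i hi => ?_)
    rw [PySem.List.pyRange_one]
    have h2 : ((n : Int) + 1 - (1 + (i : Int)) - 0).toNat = n - i := by omega
    rw [h2, List.map_map]
    refine List.map_congr_left (fun j hj => ?_)
    simp only [Function.comp]
    rw [sl]
    congr 1
    · congr 1; omega
    · congr 1; omega
  -- ===== B side: normal form of subs =====
  have hS : (PySem.List.pyRange 0 (PySem.Str.len s) 1).flatMap (fun j =>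
        (PySem.List.pyRange (j + 1) (PySem.Str.len s + 1) 1).map (fun k =>
          PySem.Str.slice s (some j) (some k)))
      = (List.range n).flatMap (fun j => (List.range (n - j)).map (fun d => sl s j (d + 1))) := by
    rw [hn, PySem.List.pyRange_one]
    have h1 : ((n : Int) - 0).toNat = n := by omega
    rw [h1, List.flatMap_map]
    refine List.flatMap_congr (fun j hj => ?_)
    rw [PySem.List.pyRange_one]
    have h2 : ((n : Int) + 1 - (0 + (j : Int) + 1)).toNat = n - j := by omega
    rw [h2, List.map_map]
    refine List.map_congr_left (fun d hd => ?_)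
    simp only [Function.comp]
    rw [sl]
    congr 1
    · congr 1; omega
    · congr 1; omega
  -- ===== sorted subs = A's tail, by stability =====
  have hsorted : PySem.List.sorted
        ((List.range n).flatMap (fun j => (List.range (n - j)).map (fun d => sl s j (d + 1))))
        (fun s => PySem.Str.len s) false
      = (List.range n).flatMap (fun i => (List.range (n - i)).map (fun j => sl s j (i + 1))) := by
    set S := (List.range n).flatMap (fun j => (List.range (n - j)).map (fun d => sl s j (d + 1))) with hSdef
    have hmem : ∀ x ∈ S, PySem.Str.len x ∈ (List.range n).map (fun i => ((i + 1 : Nat) : Int)) := by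
      intro x hx
      rw [hSdef] at hx
      obtain ⟨j, hj, hx⟩ := List.mem_flatMap.mp hx
      obtain ⟨d, hd, rfl⟩ := List.mem_map.mp hx
      rw [List.mem_range] at hj hd
      rw [len_sl s j (d + 1) (by omega)]
      simp only [List.mem_map, List.mem_range]
      exact ⟨d, by omega, rfl⟩
    have hks : ((List.range n).map (fun i => ((i + 1 : Nat) : Int))).Pairwise (· < ·) := by
      rw [List.pairwise_map]
      exact List.pairwise_lt_range.imp (fun {a b} h => by exact_mod_cast Nat.succ_lt_succ h)
    rw [sorted_blocks _ _ hks _ hmem, List.flatMap_map]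
    refine List.flatMap_congr (fun i hi => ?_)
    rw [List.mem_range] at hi
    rw [hSdef, List.filter_flatMap]
    have hblock : ∀ j, ((List.range (n - j)).map (fun d => sl s j (d + 1))).filter
          (fun x => decide (PySem.Str.len x = ((i + 1 : Nat) : Int)))
        = if i < n - j then [sl s j (i + 1)] else [] := by
      intro j
      rw [List.filter_map]
      have hfc : (List.range (n - j)).filter
            ((fun x => decide (PySem.Str.len x = ((i + 1 : Nat) : Int))) ∘ (fun d => sl s j (d + 1)))
          = (List.range (n - j)).filter (fun d => decide (d = i)) := by
        refine List.filter_congr (fun d hd => ?_)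
        rw [List.mem_range] at hd
        simp only [Function.comp]
        rw [len_sl s j (d + 1) (by omega), decide_eq_decide]
        constructor
        · intro h; exact_mod_cast Nat.succ_injective (by exact_mod_cast h)
        · intro h; rw [h]
      rw [hfc, range_filter_eq]
      exact apply_ite (List.map (fun d => sl s j (d + 1))) _ _ _
    simp only [hblock]
    have hflip : (List.range n).flatMap (fun j => if i < n - j then [sl s j (i + 1)] else [])
        = (List.range n).flatMap (fun j => if j < n - i then [sl s j (i + 1)] else []) := by
      refine List.flatMap_congr (fun j hj => ?_)
      exact if_congr (by omega) rfl rfl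
    rw [hflip, flatMap_range_if n (n - i) _ (Nat.sub_le n i)]
  -- ===== assemble =====
  rw [hA]
  simp only [set_string_alt, hS, hsorted]

-- ===== VERDICT (by name: the statement is the Claim_ definition above) =====
theorem set_string_spec : Claim_equal_set_string := by
  intro input_string _
  unfold Spec_set_string
  exact set_string_eq_alt input_string
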